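-- pv_equiv track=rewrite | github.com/lindiatjuatja/BiasMonkey | utils.py | reverse_label
-- ===== SOURCE A (Python) =====
-- import string
--
-- def reverse_label(num_options: int, responses: str) -> str:
--     response_list = list(responses.split(","))
--     alpha_labels = list(string.ascii_lowercase[:num_options])
--     reverse_labels = alpha_labels[::-1]
--     label_map = dict(zip(alpha_labels, reverse_labels))
--     reversed_labels = []
--     for char in response_list:
--         reversed_labels += label_map[char.lower()]
--     return ",".join(reversed_labels)
-- ===== SOURCE B (Python) =====
-- import string
--
-- def reverse_label(num_options: int, responses: str) -> str:
--     n = len(string.ascii_lowercase[:num_options])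
--     return ",".join(chr(2 * ord('a') + n - 1 - ord(t.lower()))
--                     for t in responses.split(","))
-- ===== Notes on version B (the rewrite author's own statement) =====
-- stated objective: simpler
-- what changed: B drops A's label_map/zip/[::-1] dictionary construction and computes each token's reflected label directly by character arithmetic chr(2*ord('a')+n-1-ord(t.lower())) in one join over the split; Pre_ excludes exactly the inputs on which A raises KeyError (a token that, lowercased, is not a single letter among the first num_options letters).
import Mathlib
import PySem

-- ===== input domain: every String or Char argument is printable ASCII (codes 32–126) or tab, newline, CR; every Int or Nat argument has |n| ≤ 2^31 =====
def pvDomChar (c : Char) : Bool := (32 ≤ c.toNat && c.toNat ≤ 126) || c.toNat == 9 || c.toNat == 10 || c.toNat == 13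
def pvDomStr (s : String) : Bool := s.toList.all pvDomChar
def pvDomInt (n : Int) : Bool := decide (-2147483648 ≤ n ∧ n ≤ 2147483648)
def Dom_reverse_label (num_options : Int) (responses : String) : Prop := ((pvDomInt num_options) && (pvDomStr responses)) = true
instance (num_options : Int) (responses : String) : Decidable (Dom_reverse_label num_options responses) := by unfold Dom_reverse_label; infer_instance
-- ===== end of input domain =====

-- B replaces A's label_map/zip/[::-1] dict construction by direct character arithmetic per token (objective: simpler).

-- string.ascii_lowercase
def pvAscii : List Char := "abcdefghijklmnopqrstuvwxyz".toList

-- ===== PORT A =====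
def reverse_label (num_options : Int) (responses : String) : String :=
  let response_list := (PySem.Str.split? responses ",").getD []
  let alpha_labels := (PySem.List.slice pvAscii none (some num_options)).map (fun c => String.ofList [c])
  let reverse_labels := (PySem.List.slice? alpha_labels none none (-1)).getD []  -- [::-1]; step -1 never raises
  let label_map := PySem.Dict.ofList (alpha_labels.zip reverse_labels)
  let reversed_labels := response_list.foldl
    (fun (acc : Option (List String)) ch =>
      acc.bind fun a => (label_map.get? (PySem.Str.lower ch)).map (fun v => a ++ [v]))
    (some [])
  PySem.Str.join "," (reversed_labels.getD [])  -- none = KeyError, excluded by Pre_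

-- ===== PORT B =====
def reverse_label_alt (num_options : Int) (responses : String) : String :=
  let n := (PySem.List.slice pvAscii none (some num_options)).length
  let out := ((PySem.Str.split? responses ",").getD []).foldl
    (fun (acc : Option (List String)) t =>
      acc.bind fun a =>
        match PySem.Chars.lower t.toList with
        | [c] =>  -- chr's argument is ≥ 67 for every domain character, so chr never raises here
          some (a ++ [String.ofList [Char.ofNat (2 * 97 + (n : Int) - 1 - (c.toNat : Int)).toNat]])
        | _ => none)  -- ord of a non-single-character string: TypeError, excluded by Pre_
    (some [])
  PySem.Str.join "," (out.getD [])

-- ===== PRECONDITION & SPEC =====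
-- Pre_ excludes exactly the inputs where A raises KeyError: some token, lowercased, is not a
-- single letter among the first num_options letters of the alphabet.
def Pre_reverse_label (num_options : Int) (responses : String) : Prop :=
  ∀ tok ∈ (PySem.Str.split? responses ",").getD [],
    PySem.Chars.lower tok.toList ∈ (PySem.List.slice pvAscii none (some num_options)).map (fun c => [c])
instance (num_options : Int) (responses : String) : Decidable (Pre_reverse_label num_options responses) := by
  unfold Pre_reverse_label; infer_instance

def pvWitness_reverse_label : Int × String := (4, "a,B,d")

def Spec_reverse_label (num_options : Int) (responses : String) (out : String) : Prop := out = reverse_label_alt num_options responses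
instance (num_options : Int) (responses : String) (out : String) : Decidable (Spec_reverse_label num_options responses out) := by unfold Spec_reverse_label; infer_instance

-- ===== CLAIM (what is proved, stated in full; the proofs are below) =====
def Claim_equal_reverse_label : Prop := ∀ (num_options : Int) (responses : String), Dom_reverse_label num_options responses → Pre_reverse_label num_options responses → Spec_reverse_label num_options responses (reverse_label num_options responses)

-- ===== LEMMAS AND PROOFS =====

lemma pv_len : pvAscii.length = 26 := by decide

lemma pv_nodup : pvAscii.Nodup := by decide

lemma pv_get : ∀ j, j < 26 → pvAscii[j]? = some (Char.ofNat (97 + j)) := by decide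

-- string.ascii_lowercase[:b] is a take of at most 26 characters
lemma pv_slice_is_take (b : Int) :
    ∃ m, m ≤ 26 ∧ PySem.List.slice pvAscii none (some b) = pvAscii.take m := by
  rcases le_or_gt 0 b with h | h
  · refine ⟨min b.toNat 26, by omega, ?_⟩
    rw [PySem.List.slice_to pvAscii h]
    by_cases hb : b.toNat ≤ 26
    · rw [Nat.min_eq_left hb]
    · rw [Nat.min_eq_right (by omega), List.take_of_length_le (by rw [pv_len]; omega),
        List.take_of_length_le (by rw [pv_len])]
  · obtain ⟨k, hk0, rfl⟩ : ∃ k : Nat, 0 < k ∧ b = -(k : Int) := ⟨(-b).toNat, by omega, by omega⟩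
    exact ⟨26 - k, by omega, by rw [PySem.List.slice_to_neg_natCast pvAscii k hk0, pv_len]⟩

-- find? on a zip of nodup keys returns the entry at the key's position
lemma pv_find_zip {α β : Type} [BEq α] [LawfulBEq α] :
    ∀ (ks : List α) (vs : List β) (i : Nat) (hi : i < ks.length)
      (hl : ks.length = vs.length), ks.Nodup →
      (ks.zip vs).find? (fun p => p.1 == ks[i]) = some (ks[i], vs[i]'(hl ▸ hi)) := by
  intro ks
  induction ks with
  | nil => intro vs i hi; simp at hi
  | cons k ks ih =>
    intro vs i hi hl hnd
    cases vs with
    | nil => simp at hl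
    | cons v vs =>
      cases i with
      | zero => simp
      | succ i =>
        have hi' : i < ks.length := by simpa using hi
        have hki : ks[i] ≠ k := fun h => (List.nodup_cons.mp hnd).1 (h ▸ List.getElem_mem _)
        have hbk : (k == ks[i]) = false := by simp [Ne.symm hki]
        simp only [List.zip_cons_cons, List.find?_cons, List.getElem_cons_succ, hbk]
        exact ih vs i hi' (by simpa using hl) (List.nodup_cons.mp hnd).2

-- dict(pairs) keeps the pairs as items when the keys are distinct
lemma pv_items_ofList {κ ν : Type} [BEq κ] [LawfulBEq κ] (ps : List (κ × ν))
    (h : (ps.map Prod.fst).Nodup) : (PySem.Dict.ofList ps).items = ps := by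
  have := PySem.Dict.items_foldl_insert_fresh ps Prod.fst Prod.snd PySem.Dict.empty
    (fun a _ => by simp [PySem.Dict.contains_empty]) h
  simpa [PySem.Dict.ofList, PySem.Dict.update, PySem.Dict.empty] using this

lemma pv_take_get (m : Nat) (hm : m ≤ 26) (j : Nat) (hj : j < m)
    (h : j < (pvAscii.take m).length) : (pvAscii.take m)[j] = Char.ofNat (97 + j) := by
  have h26 : j < pvAscii.length := by rw [pv_len]; omega
  have := pv_get j (by omega)
  rw [List.getElem?_eq_getElem h26] at this
  simpa [List.getElem_take] using this

-- a character of the sliced label list has code 97 + its index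
lemma pv_mem_code (m : Nat) (hm : m ≤ 26) (c : Char) (hc : c ∈ pvAscii.take m) :
    97 ≤ c.toNat ∧ c.toNat < 97 + m := by
  obtain ⟨i, hi, hci⟩ := List.mem_iff_getElem.mp hc
  have hLlen : (pvAscii.take m).length = m := by rw [List.length_take, pv_len]; omega
  have him : i < m := by omega
  have hcval : c.toNat = 97 + i := by
    rw [← hci, pv_take_get m hm i him hi, Char.toNat_ofNat]
    have hv : (97 + i).isValidChar := Or.inl (by omega)
    simp [hv]
  omega

-- A's dictionary lookup agrees with the arithmetic reflection on every admitted letter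
lemma pv_token (m : Nat) (hm : m ≤ 26) (c : Char) (hc : c ∈ pvAscii.take m) :
    (PySem.Dict.ofList (((pvAscii.take m).map (fun c => String.ofList [c])).zip
        (((pvAscii.take m).map (fun c => String.ofList [c])).reverse))).get?
      (String.ofList [c])
    = some (String.ofList [Char.ofNat ('a'.toNat + ((pvAscii.take m).length - 1) - (c.toNat - 'a'.toNat))]) := by
  have hLlen : (pvAscii.take m).length = m := by
    rw [List.length_take, pv_len]; omega
  obtain ⟨i, hi, hci⟩ := List.mem_iff_getElem.mp hc
  have him : i < m := by omega
  have hA : ((pvAscii.take m).map (fun c => String.ofList [c])).length = m := by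
    simpa using hLlen
  have hnd : ((pvAscii.take m).map (fun c => String.ofList [c])).Nodup := by
    refine List.Nodup.map ?_ (pv_nodup.sublist (List.take_sublist m pvAscii))
    intro a b h
    simpa [String.ofList_inj] using h
  have hitems := pv_items_ofList
    (((pvAscii.take m).map (fun c => String.ofList [c])).zip
      (((pvAscii.take m).map (fun c => String.ofList [c])).reverse))
    (by rw [List.map_fst_zip (by simp)]; exact hnd)
  have hiA : i < ((pvAscii.take m).map (fun c => String.ofList [c])).length := by omega
  have hkey : String.ofList [c] = ((pvAscii.take m).map (fun c => String.ofList [c]))[i] := by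
    simp [← hci]
  rw [PySem.Dict.get?, hitems, hkey]
  rw [pv_find_zip _ _ i hiA (by simp) hnd]
  have hrev : (((pvAscii.take m).map (fun c => String.ofList [c])).reverse)[i]'(by simpa using hiA)
      = String.ofList [Char.ofNat (97 + (m - 1 - i))] := by
    rw [List.getElem_reverse]
    simp only [List.getElem_map]
    rw [pv_take_get m hm _ (by omega)]
    rw [hA]
  have hcval : c.toNat = 97 + i := by
    rw [← hci, pv_take_get m hm i him hi, Char.toNat_ofNat]
    have hv : (97 + i).isValidChar := Or.inl (by omega)
    simp [hv]
  simp only [Option.map_some, hrev]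
  have harg : Char.ofNat (97 + (m - 1 - i)) = Char.ofNat ('a'.toNat + ((pvAscii.take m).length - 1) - (c.toNat - 'a'.toNat)) := by
    have h97 : 'a'.toNat = 97 := by decide
    rw [h97, hcval, hLlen]
    congr 1
    omega
  rw [harg]

-- the two folds agree token by token
lemma pv_fold (m : Nat) (hm : m ≤ 26) :
    ∀ (toks : List String),
      (∀ tok ∈ toks, ∃ c ∈ pvAscii.take m, PySem.Chars.lower tok.toList = [c]) →
      ∀ (acc : List String),
      toks.foldl
        (fun (acc : Option (List String)) ch =>
          acc.bind fun a =>
            ((PySem.Dict.ofList (((pvAscii.take m).map (fun c => String.ofList [c])).zip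
                (((pvAscii.take m).map (fun c => String.ofList [c])).reverse))).get?
              (PySem.Str.lower ch)).map (fun v => a ++ [v]))
        (some acc)
      = toks.foldl
        (fun (acc : Option (List String)) t =>
          acc.bind fun a =>
            match PySem.Chars.lower t.toList with
            | [c] =>
              some (a ++ [String.ofList [Char.ofNat (2 * 97 + (((pvAscii.take m).length : Int)) - 1 - (c.toNat : Int)).toNat]])
            | _ => none)
        (some acc) := by
  intro toks
  induction toks with
  | nil => intro _ _; rfl
  | cons tok toks ih =>
    intro hp acc
    obtain ⟨c, hcmem, hlow⟩ := hp tok (List.mem_cons_self ..)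
    have hlowS : PySem.Str.lower tok = String.ofList [c] := by
      rw [← String.ofList_toList (s := PySem.Str.lower tok), PySem.Str.toList_lower, hlow]
    have hLlen : (pvAscii.take m).length = m := by rw [List.length_take, pv_len]; omega
    obtain ⟨h1, h2⟩ := pv_mem_code m hm c hcmem
    simp only [List.foldl_cons, Option.bind_some]
    rw [hlowS, pv_token m hm c hcmem, hlow]
    simp only [Option.map_some]
    have harg : Char.ofNat ('a'.toNat + ((pvAscii.take m).length - 1) - (c.toNat - 'a'.toNat))
        = Char.ofNat (2 * 97 + (((pvAscii.take m).length : Int)) - 1 - (c.toNat : Int)).toNat := by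
      have h97 : 'a'.toNat = 97 := by decide
      rw [h97, hLlen]
      congr 1
      omega
    rw [harg]
    exact ih (fun t ht => hp t (List.mem_cons_of_mem _ ht)) _

-- ===== VERDICT (by name: the statement is the Claim_ definition above) =====
theorem reverse_label_spec : Claim_equal_reverse_label := by
  intro num_options responses _hdom hpre
  unfold Spec_reverse_label
  obtain ⟨m, hm, htake⟩ := pv_slice_is_take num_options
  unfold Pre_reverse_label at hpre
  rw [htake] at hpre
  replace hpre : ∀ tok ∈ (PySem.Str.split? responses ",").getD [],
      ∃ c ∈ pvAscii.take m, PySem.Chars.lower tok.toList = [c] := by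
    intro tok ht
    obtain ⟨c, hc, he⟩ := List.mem_map.mp (hpre tok ht)
    exact ⟨c, hc, he.symm⟩
  unfold reverse_label reverse_label_alt
  simp only [PySem.List.slice?_none_none_neg_one, Option.getD_some, htake]
  rw [pv_fold m hm _ hpre []]
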